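-- pv_equiv track=rewrite | github.com/tudoranghelina91/GeeksForGeeksDSARoadmap | 1. Arrays/MaxSumSubarrayRepeatedConcat.py | max_sum_subarr_repeated
-- ===== SOURCE A (Python) =====
-- def max_sum_subarr_repeated(arr, k):
--     n = len(arr)
--     max_so_far = float('-inf')
--     max_ending_here = 0
--
--     for i in range(n * k):
--         # Use modular arithmetic to get the next element
--         max_ending_here += arr[i % n]
--         max_so_far = max(max_so_far, max_ending_here)
--
--         if max_ending_here < 0:
--             max_ending_here = 0
--
--     return max_so_far
-- ===== SOURCE B (Python) =====
-- def max_sum_subarr_repeated(arr, k):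
--     # Prefix-sum formulation: best subarray sum = max over positions of
--     # (prefix - minimum earlier prefix); iterate the list itself k times.
--     best = float('-inf')
--     prefix = 0
--     min_prefix = 0
--     for _ in range(k):
--         for x in arr:
--             prefix += x
--             best = max(best, prefix - min_prefix)
--             min_prefix = min(min_prefix, prefix)
--     return best
-- ===== Notes on version B (the rewrite author's own statement) =====
-- stated objective: alternative
-- what changed: B replaces Kadane's reset-to-zero recurrence over modular indices i % n with a running prefix sum plus minimum-prefix tracking (best = max(best, prefix - min_prefix)), iterating the list itself k times with no index arithmetic.
-- outside the precondition, e.g. on max_sum_subarr_repeated([], 3): A returns -inf, B returns -inf; on max_sum_subarr_repeated([1, 2], 0): A returns -inf, B returns -inf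
import Mathlib
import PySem

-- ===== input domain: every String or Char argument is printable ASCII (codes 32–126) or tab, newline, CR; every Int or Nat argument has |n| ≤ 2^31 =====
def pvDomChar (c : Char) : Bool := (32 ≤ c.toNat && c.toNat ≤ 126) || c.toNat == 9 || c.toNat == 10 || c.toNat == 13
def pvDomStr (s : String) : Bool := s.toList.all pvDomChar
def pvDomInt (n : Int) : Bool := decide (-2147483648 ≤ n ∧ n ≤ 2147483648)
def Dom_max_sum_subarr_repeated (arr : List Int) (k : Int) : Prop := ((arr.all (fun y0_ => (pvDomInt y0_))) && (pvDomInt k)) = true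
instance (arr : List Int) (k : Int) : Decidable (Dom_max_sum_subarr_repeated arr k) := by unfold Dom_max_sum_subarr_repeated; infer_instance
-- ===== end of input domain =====

-- B replaces Kadane's reset-to-zero recurrence over modular indices with a running
-- prefix sum and minimum-prefix tracking, iterating the list itself k times (alternative
-- formulation, same cost).

-- ===== PORT A =====
def max_sum_subarr_repeated (arr : List Int) (k : Int) : Int :=
  let n : Int := arr.length
  let r :=
    (PySem.List.pyRange 0 (n * k) 1).foldl
      (fun (st : Option Int × Int) i =>
        -- arr[i % n]: whenever the loop body runs, 0 ≤ i % n < n, so no IndexError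
        let c := st.2 + PySem.List.pyGetD arr (PySem.Int.mod i n) 0
        ((some (match st.1 with | none => c | some m => max m c) : Option Int),
         if c < 0 then 0 else c))
      (none, 0)
  r.1.getD 0  -- none models float('-inf'), the no-iteration case; excluded by Pre_

-- ===== PORT B =====
def max_sum_subarr_repeated_alt (arr : List Int) (k : Int) : Int :=
  let r :=
    (PySem.List.pyRange 0 k 1).foldl
      (fun (st : Option Int × Int × Int) _ =>
        arr.foldl
          (fun (st : Option Int × Int × Int) x =>
            let p := st.2.1 + x
            ((some (match st.1 with | none => p - st.2.2 | some m => max m (p - st.2.2)) : Option Int),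
             p, min st.2.2 p))
          st)
      (none, 0, 0)
  r.1.getD 0  -- none models float('-inf'), the no-iteration case; excluded by Pre_

-- ===== PRECONDITION & SPEC =====
-- Pre_ excludes empty arr and k ≤ 0: there the loop never runs and A returns
-- float('-inf'), which is not a value of the declared int type.
def Pre_max_sum_subarr_repeated (arr : List Int) (k : Int) : Prop := arr ≠ [] ∧ 1 ≤ k
instance (arr : List Int) (k : Int) : Decidable (Pre_max_sum_subarr_repeated arr k) := by
  unfold Pre_max_sum_subarr_repeated; infer_instance

def pvWitness_max_sum_subarr_repeated : List Int × Int := ([1, -2, 3], 2)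

def Spec_max_sum_subarr_repeated (arr : List Int) (k : Int) (out : Int) : Prop := out = max_sum_subarr_repeated_alt arr k
instance (arr : List Int) (k : Int) (out : Int) : Decidable (Spec_max_sum_subarr_repeated arr k out) := by unfold Spec_max_sum_subarr_repeated; infer_instance

-- ===== CLAIM (what is proved, stated in full; the proofs are below) =====
def Claim_equal_max_sum_subarr_repeated : Prop := ∀ (arr : List Int) (k : Int), Dom_max_sum_subarr_repeated arr k → Pre_max_sum_subarr_repeated arr k → Spec_max_sum_subarr_repeated arr k (max_sum_subarr_repeated arr k)

-- ===== LEMMAS AND PROOFS =====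

-- A's loop body (Kadane with reset), as a step function on (max_so_far?, max_ending_here)
def pvStepA (st : Option Int × Int) (x : Int) : Option Int × Int :=
  let c := st.2 + x
  ((some (match st.1 with | none => c | some m => max m c) : Option Int),
   if c < 0 then 0 else c)

-- B's inner-loop body, as a step function on (best?, prefix, min_prefix)
def pvStepB (st : Option Int × Int × Int) (x : Int) : Option Int × Int × Int :=
  let p := st.2.1 + x
  ((some (match st.1 with | none => p - st.2.2 | some m => max m (p - st.2.2)) : Option Int),
   p, min st.2.2 p)

lemma pvPortA_eq (arr : List Int) (k : Int) :
    max_sum_subarr_repeated arr k =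
      ((PySem.List.pyRange 0 ((arr.length : Int) * k) 1).foldl
        (fun st i => pvStepA st (PySem.List.pyGetD arr (PySem.Int.mod i (arr.length : Int)) 0))
        (none, 0)).1.getD 0 := rfl

lemma pvPortB_eq (arr : List Int) (k : Int) :
    max_sum_subarr_repeated_alt arr k =
      ((PySem.List.pyRange 0 k 1).foldl (fun st _ => arr.foldl pvStepB st) (none, 0, 0)).1.getD 0 := rfl

-- one block of A's loop reads exactly arr
lemma pvMapBlock (arr : List Int) (hne : arr ≠ []) (j : ℕ) :
    (PySem.List.pyRange ((arr.length : Int) * j) ((arr.length : Int) * j + arr.length) 1).map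
      (fun i => PySem.List.pyGetD arr (PySem.Int.mod i (arr.length : Int)) 0) = arr := by
  have hn : (0:Int) < (arr.length : Int) := by
    have := List.length_pos_iff.mpr hne; exact_mod_cast this
  apply List.ext_getElem
  · simp [PySem.List.length_pyRange_one]
  · intro i h1 h2
    rw [List.getElem_map, PySem.List.getElem_pyRange_one]
    rw [PySem.Int.mod_eq_emod_of_pos hn]
    have hi : i < arr.length := by
      simpa [PySem.List.length_pyRange_one] using h1
    have hmod : ((arr.length : Int) * j + (i : Int)) % (arr.length : Int) = (i : Int) := by
      rw [add_comm, Int.add_mul_emod_self_left]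
      exact Int.emod_eq_of_lt (by omega) (by exact_mod_cast hi)
    rw [hmod]
    simp [PySem.List.pyGetD_natCast, List.getD_eq_getElem?_getD, List.getElem?_eq_getElem hi]

-- A's fold over range(n*j) with i % n = fold of pvStepA over j concatenated copies of arr
lemma pvABlocks (arr : List Int) (hne : arr ≠ []) :
    ∀ (j : ℕ) (s : Option Int × Int),
      (PySem.List.pyRange 0 ((arr.length : Int) * j) 1).foldl
        (fun st i => pvStepA st (PySem.List.pyGetD arr (PySem.Int.mod i (arr.length : Int)) 0)) s
      = List.foldl pvStepA s (List.replicate j arr).flatten := by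
  intro j
  induction j with
  | zero =>
    intro s
    rw [show ((arr.length : Int) * ((0:ℕ) : Int)) = 0 by simp]
    rw [PySem.List.pyRange_one_eq_nil le_rfl]
    simp
  | succ j ih =>
    intro s
    have hsplit : PySem.List.pyRange 0 ((arr.length : Int) * ((j+1 : ℕ) : Int)) 1
        = PySem.List.pyRange 0 ((arr.length : Int) * (j : ℕ)) 1
          ++ PySem.List.pyRange ((arr.length : Int) * (j : ℕ))
               ((arr.length : Int) * (j : ℕ) + arr.length) 1 := by
      rw [show ((arr.length : Int) * ((j+1 : ℕ) : Int))
            = (arr.length : Int) * (j : ℕ) + arr.length by push_cast; ring]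
      exact PySem.List.pyRange_one_append 0 _ _ (by positivity) (by omega)
    rw [hsplit, List.foldl_append, ih]
    rw [← List.foldl_map
          (f := fun i => PySem.List.pyGetD arr (PySem.Int.mod i (arr.length : Int)) 0)
          (g := pvStepA)]
    rw [pvMapBlock arr hne j]
    rw [List.replicate_succ', List.flatten_append, List.foldl_append]
    simp

-- B's outer loop over range(k) = fold of pvStepB over j concatenated copies of arr
lemma pvBIter (arr : List Int) :
    ∀ (j : ℕ) (a : Int) (t : Option Int × Int × Int),
      (PySem.List.pyRange a (a + j) 1).foldl (fun st _ => arr.foldl pvStepB st) t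
      = List.foldl pvStepB t (List.replicate j arr).flatten := by
  intro j
  induction j with
  | zero =>
    intro a t
    rw [PySem.List.pyRange_one_eq_nil (by simp : a + ((0:ℕ) : Int) ≤ a)]
    simp
  | succ j ih =>
    intro a t
    rw [PySem.List.pyRange_one_cons (by push_cast; omega : a < a + ((j+1 : ℕ) : Int))]
    rw [List.foldl_cons]
    have : a + ((j+1 : ℕ) : Int) = (a + 1) + (j : ℕ) := by push_cast; ring
    rw [this, ih (a + 1) (arr.foldl pvStepB t)]
    rw [List.replicate_succ, List.flatten_cons, List.foldl_append]

-- the two recurrences agree: max_ending_here = prefix - min_prefix, bests equal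
lemma pvInv (xs : List Int) :
    ∀ (s : Option Int × Int) (t : Option Int × Int × Int),
      s.1 = t.1 → s.2 = t.2.1 - t.2.2 →
      (List.foldl pvStepA s xs).1 = (List.foldl pvStepB t xs).1 ∧
      (List.foldl pvStepA s xs).2 =
        (List.foldl pvStepB t xs).2.1 - (List.foldl pvStepB t xs).2.2 := by
  induction xs with
  | nil => intro s t h1 h2; exact ⟨h1, h2⟩
  | cons x xs ih =>
    intro s t h1 h2
    simp only [List.foldl_cons]
    apply ih
    · simp only [pvStepA, pvStepB, h1]
      congr 1
      cases t.1 <;> simp <;> omega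
    · simp only [pvStepA, pvStepB]
      rcases le_total t.2.2 (t.2.1 + x) with h | h <;>
        simp [h] <;> omega

-- ===== VERDICT (by name: the statement is the Claim_ definition above) =====
theorem max_sum_subarr_repeated_spec : Claim_equal_max_sum_subarr_repeated := by
  intro arr k _ hpre
  obtain ⟨hne, hk⟩ := hpre
  unfold Spec_max_sum_subarr_repeated
  rw [pvPortA_eq, pvPortB_eq]
  obtain ⟨j, rfl⟩ : ∃ j : ℕ, k = (j : Int) := ⟨k.toNat, (Int.toNat_of_nonneg (by omega)).symm⟩
  rw [pvABlocks arr hne j]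
  have hb := pvBIter arr j 0 (none, 0, 0)
  rw [show (0 + (j : Int)) = (j : Int) by ring] at hb
  rw [hb]
  have h := pvInv (List.replicate j arr).flatten (none, 0) (none, 0, 0) rfl (by norm_num)
  rw [h.1]
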